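-- pv_equiv track=rewrite | github.com/WeStillDontKnowTheAlgorithmWeSawThatDay/AlgorithmStudyOfDestruction | 1주차/PGS_모의고사_라온.py | solution
-- ===== SOURCE A (Python) =====
-- def solution(answers):
--     result = []
--     people = {
--         1: [1, 2, 3, 4, 5],
--         2: [2, 1, 2, 3, 2, 4, 2, 5],
--         3: [3, 3, 1, 1, 2, 2, 4, 4, 5, 5]
--     }
--
--     i = 0
--     correct = [0, 0, 0]
--     for answer in answers:
--         for person in people:
--             numbers = people[person]
--             if numbers[i%len(numbers)] == answer:
--                 correct[person-1] += 1
--         i += 1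
--
--     for i in range(len(correct)):
--         if correct[i] == max(correct):
--             result.append(i+1)
--     return result
-- ===== SOURCE B (Python) =====
-- def solution(answers):
--     # All three fixed patterns repeat with period lcm(5, 8, 10) = 40, so one pass
--     # builds a histogram keyed by (position mod 40, answer); each score is then 40 lookups.
--     patterns = [[1, 2, 3, 4, 5],
--                 [2, 1, 2, 3, 2, 4, 2, 5],
--                 [3, 3, 1, 1, 2, 2, 4, 4, 5, 5]]
--     cnt = {}
--     for i, a in enumerate(answers):
--         k = (i % 40, a)
--         cnt[k] = cnt.get(k, 0) + 1
--     scores = [sum(cnt.get((r, p[r % len(p)]), 0) for r in range(40)) for p in patterns]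
--     best = max(scores)
--     return [i + 1 for i, s in enumerate(scores) if s == best]
-- ===== Notes on version B (the rewrite author's own statement) =====
-- stated objective: alternative
-- what changed: B replaces A's interleaved per-answer comparison against all three patterns by a histogram: the patterns repeat with period lcm(5,8,10)=40, so one pass builds a dict counting (index mod 40, answer) pairs and each pattern's score is recovered as 40 dictionary lookups, with no per-answer pattern comparison at all.
import Mathlib
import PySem

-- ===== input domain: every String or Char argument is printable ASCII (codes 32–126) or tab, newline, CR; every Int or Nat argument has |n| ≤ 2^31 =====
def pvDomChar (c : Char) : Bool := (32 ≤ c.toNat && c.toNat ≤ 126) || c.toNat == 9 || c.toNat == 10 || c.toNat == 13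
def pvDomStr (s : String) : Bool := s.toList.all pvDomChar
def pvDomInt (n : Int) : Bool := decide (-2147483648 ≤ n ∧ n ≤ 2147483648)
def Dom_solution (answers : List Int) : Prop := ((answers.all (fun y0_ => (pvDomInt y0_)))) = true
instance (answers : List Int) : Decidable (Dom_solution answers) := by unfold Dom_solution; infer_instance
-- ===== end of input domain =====

-- B exploits that the three patterns repeat with period lcm(5,8,10)=40: one pass builds a
-- histogram keyed by (index mod 40, answer), then each score is 40 lookups; objective: alternative.

-- ===== PORT A =====
def pvPeople : List (Int × List Int) :=
  [(1, [1, 2, 3, 4, 5]),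
   (2, [2, 1, 2, 3, 2, 4, 2, 5]),
   (3, [3, 3, 1, 1, 2, 2, 4, 4, 5, 5])]

-- inner 'for person in people' body (index is always in range, so pyGetD/pySetD are exact)
def pvStepA (st : Int × List Int) (answer : Int) : Int × List Int :=
  let correct := pvPeople.foldl (fun correct pr =>
    let numbers := pr.2
    if PySem.List.pyGetD numbers (PySem.Int.mod st.1 (numbers.length : Int)) 0 == answer
    then PySem.List.pySetD correct (pr.1 - 1) (PySem.List.pyGetD correct (pr.1 - 1) 0 + 1)
    else correct) st.2
  (st.1 + 1, correct)

def solution (answers : List Int) : List Int :=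
  let st := answers.foldl pvStepA (0, [0, 0, 0])
  let correct := st.2
  (PySem.List.pyRange 0 (correct.length : Int) 1).foldl (fun result i =>
    if PySem.List.pyGetD correct i 0 == (PySem.List.max? correct (fun y => y)).getD 0
    then result ++ [i + 1] else result) []

-- ===== PORT B =====
def pvPatterns : List (List Int) :=
  [[1, 2, 3, 4, 5], [2, 1, 2, 3, 2, 4, 2, 5], [3, 3, 1, 1, 2, 2, 4, 4, 5, 5]]

-- cnt[(i % 40, a)] = cnt.get((i % 40, a), 0) + 1  over enumerate(answers)
def pvCntB (answers : List Int) : PySem.Dict (Int × Int) Int :=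
  (PySem.List.enumerate answers).foldl
    (fun d ia =>
      d.insert (PySem.Int.mod ia.1 40, ia.2)
        (d.getD (PySem.Int.mod ia.1 40, ia.2) 0 + 1)) PySem.Dict.empty

-- sum(cnt.get((r, p[r % len(p)]), 0) for r in range(40))
def pvScoreRow (cnt : PySem.Dict (Int × Int) Int) (p : List Int) : Int :=
  ((PySem.List.pyRange 0 40 1).map
    (fun r => cnt.getD (r, PySem.List.pyGetD p (PySem.Int.mod r (p.length : Int)) 0) 0)).sum

def solution_alt (answers : List Int) : List Int :=
  let cnt := pvCntB answers
  let scores := pvPatterns.map (fun p => pvScoreRow cnt p)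
  let best := (PySem.List.max? scores (fun y => y)).getD 0
  ((PySem.List.enumerate scores).filter (fun is => is.2 == best)).map (fun is => is.1 + 1)

-- ===== PRECONDITION & SPEC =====
def Spec_solution (answers : List Int) (out : List Int) : Prop := out = solution_alt answers
instance (answers : List Int) (out : List Int) : Decidable (Spec_solution answers out) := by unfold Spec_solution; infer_instance

-- ===== CLAIM (what is proved, stated in full; the proofs are below) =====
def Claim_equal_solution : Prop := ∀ (answers : List Int), Dom_solution answers → Spec_solution answers (solution answers)

-- ===== LEMMAS AND PROOFS =====

-- number of matches of pattern p against xs, positions starting at s (A's per-pattern count)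
def pvScoreFrom (p : List Int) (s : Int) (xs : List Int) : Int :=
  (PySem.List.enumerate xs s).foldl
    (fun t ia => if ia.2 == PySem.List.pyGetD p (PySem.Int.mod ia.1 (p.length : Int)) 0 then t + 1 else t) 0

-- the key stream B's counter is built over
def pvKeys (s : Int) (xs : List Int) : List (Int × Int) :=
  (PySem.List.enumerate xs s).map (fun ia => (PySem.Int.mod ia.1 40, ia.2))

theorem pvScore_acc (p : List Int) (l : List (Int × Int)) (acc : Int) :
    l.foldl (fun t ia => if ia.2 == PySem.List.pyGetD p (PySem.Int.mod ia.1 (p.length : Int)) 0 then t + 1 else t) acc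
    = acc + l.foldl (fun t ia => if ia.2 == PySem.List.pyGetD p (PySem.Int.mod ia.1 (p.length : Int)) 0 then t + 1 else t) 0 := by
  induction l generalizing acc with
  | nil => simp
  | cons y l ih =>
    simp only [List.foldl_cons]
    rw [ih ((if y.2 == PySem.List.pyGetD p (PySem.Int.mod y.1 (p.length : Int)) 0 then acc + 1 else acc)),
        ih ((if y.2 == PySem.List.pyGetD p (PySem.Int.mod y.1 (p.length : Int)) 0 then (0 : Int) + 1 else 0))]
    split <;> ring

theorem pvScoreFrom_cons (p : List Int) (x : Int) (xs : List Int) (s : Int) :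
    pvScoreFrom p s (x :: xs)
    = (if x == PySem.List.pyGetD p (PySem.Int.mod s (p.length : Int)) 0 then 1 else 0)
      + pvScoreFrom p (s + 1) xs := by
  simp only [pvScoreFrom, PySem.List.enumerate_cons, List.foldl_cons]
  rw [pvScore_acc]
  split <;> ring

theorem pvGetD3_0 (a b c : Int) : PySem.List.pyGetD [a, b, c] (1 - 1) 0 = a := by
  norm_num [PySem.List.pyGetD, PySem.List.pyGet?, PySem.List.pyIdx?, Int.toNat]

theorem pvGetD3_1 (a b c : Int) : PySem.List.pyGetD [a, b, c] (2 - 1) 0 = b := by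
  norm_num [PySem.List.pyGetD, PySem.List.pyGet?, PySem.List.pyIdx?, Int.toNat]

theorem pvGetD3_2 (a b c : Int) : PySem.List.pyGetD [a, b, c] (3 - 1) 0 = c := by
  norm_num [PySem.List.pyGetD, PySem.List.pyGet?, PySem.List.pyIdx?, Int.toNat]

theorem pvSetD3_0 (a b c v : Int) : PySem.List.pySetD [a, b, c] (1 - 1) v = [v, b, c] := by
  norm_num [PySem.List.pySetD, PySem.List.pySet?, PySem.List.pyIdx?, Int.toNat]

theorem pvSetD3_1 (a b c v : Int) : PySem.List.pySetD [a, b, c] (2 - 1) v = [a, v, c] := by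
  norm_num [PySem.List.pySetD, PySem.List.pySet?, PySem.List.pyIdx?, Int.toNat]

theorem pvSetD3_2 (a b c v : Int) : PySem.List.pySetD [a, b, c] (3 - 1) v = [a, b, v] := by
  norm_num [PySem.List.pySetD, PySem.List.pySet?, PySem.List.pyIdx?, Int.toNat]

theorem pvBeqComm (u v : Int) : (u == v) = (v == u) := by
  by_cases h : u = v
  · simp [h]
  · simp [h, Ne.symm h]

-- A's whole counting loop computes the three per-pattern counts
theorem pvFoldA_eq (xs : List Int) (i a b c : Int) :
    xs.foldl pvStepA (i, [a, b, c])
    = (i + xs.length,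
       [a + pvScoreFrom [1, 2, 3, 4, 5] i xs,
        b + pvScoreFrom [2, 1, 2, 3, 2, 4, 2, 5] i xs,
        c + pvScoreFrom [3, 3, 1, 1, 2, 2, 4, 4, 5, 5] i xs]) := by
  induction xs generalizing i a b c with
  | nil => simp [pvScoreFrom, PySem.List.enumerate_nil]
  | cons x xs ih =>
    rw [List.foldl_cons, pvScoreFrom_cons, pvScoreFrom_cons, pvScoreFrom_cons]
    simp only [pvStepA, pvPeople, List.foldl_cons, List.foldl_nil, pvBeqComm]
    split_ifs <;>
      · try simp only [pvGetD3_0, pvGetD3_1, pvGetD3_2, pvSetD3_0, pvSetD3_1, pvSetD3_2]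
        rw [ih]
        simp only [Prod.mk.injEq, List.cons.injEq, List.length_cons, and_true]
        push_cast
        refine ⟨by ring, by ring, by ring, by ring⟩

-- B's counter fold is a plain counter fold over the key stream
theorem pvCnt_eq (xs : List Int) (s : Int) (d : PySem.Dict (Int × Int) Int) :
    (PySem.List.enumerate xs s).foldl
      (fun d ia =>
        d.insert (PySem.Int.mod ia.1 40, ia.2)
          (d.getD (PySem.Int.mod ia.1 40, ia.2) 0 + 1)) d
    = (pvKeys s xs).foldl (fun d k => d.insert k (d.getD k 0 + 1)) d := by
  simp [pvKeys, List.foldl_map]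

-- sum over a nodup index list of a one-point indicator
theorem pvIndSum (R : List Int) (hnd : R.Nodup) (m : Int) (hm : m ∈ R) (g : Int → Int) (x : Int) :
    (R.map (fun r => if ((m, x) = (r, g r)) then (1 : Int) else 0)).sum
    = if x = g m then 1 else 0 := by
  induction R with
  | nil => cases hm
  | cons r R ih =>
    rw [List.map_cons, List.sum_cons]
    by_cases hr : r = m
    · subst hr
      have hzero : (R.map (fun r' => if ((r, x) = (r', g r')) then (1 : Int) else 0)).sum = 0 := by
        apply List.sum_eq_zero
        intro y hy
        rcases List.mem_map.mp hy with ⟨r', hr', rfl⟩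
        have : r ≠ r' := fun h => (List.nodup_cons.mp hnd).1 (h ▸ hr')
        simp [Prod.ext_iff, this]
      rw [hzero]
      by_cases hx : x = g r <;> simp [Prod.ext_iff, hx]
    · have hm' : m ∈ R := by
        cases List.mem_cons.mp hm with
        | inl h => exact absurd h.symm hr
        | inr h => exact h
      rw [ih (List.nodup_cons.mp hnd).2 hm']
      have hne : ¬ ((m, x) = (r, g r)) := by
        intro h
        exact hr (congrArg Prod.fst h).symm
      simp [hne]

-- the 40-bucket histogram sums back to the per-pattern match count
theorem pvSum_count (p : List Int) (hL : 0 < (p.length : Int)) (hdvd : (p.length : Int) ∣ 40)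
    (xs : List Int) (s : Int) (hs : 0 ≤ s) :
    ((PySem.List.pyRange 0 40 1).map
      (fun r => ((pvKeys s xs).count (r, PySem.List.pyGetD p (PySem.Int.mod r (p.length : Int)) 0) : Int))).sum
    = pvScoreFrom p s xs := by
  induction xs generalizing s with
  | nil =>
    simp [pvKeys, pvScoreFrom, PySem.List.enumerate_nil, List.sum_eq_zero]
  | cons x xs ih =>
    have hkeys : pvKeys s (x :: xs) = (PySem.Int.mod s 40, x) :: pvKeys (s + 1) xs := by
      simp [pvKeys, PySem.List.enumerate_cons]
    rw [hkeys, pvScoreFrom_cons, ← ih (s + 1) (by omega)]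
    have hsplit :
        ((PySem.List.pyRange 0 40 1).map
          (fun r => (((PySem.Int.mod s 40, x) :: pvKeys (s + 1) xs).count
            (r, PySem.List.pyGetD p (PySem.Int.mod r (p.length : Int)) 0) : Int))).sum
        = ((PySem.List.pyRange 0 40 1).map
            (fun r => (if ((PySem.Int.mod s 40, x) = (r, PySem.List.pyGetD p (PySem.Int.mod r (p.length : Int)) 0)) then (1 : Int) else 0)
              + ((pvKeys (s + 1) xs).count (r, PySem.List.pyGetD p (PySem.Int.mod r (p.length : Int)) 0) : Int))).sum := by
      congr 1
      apply List.map_congr_left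
      intro r _
      rw [List.count_cons]
      push_cast [apply_ite]
      simp only [beq_iff_eq, Prod.mk.injEq]
      split_ifs <;> omega
    rw [hsplit, PySem.List.sum_map_add_int]
    have hmem : PySem.Int.mod s 40 ∈ PySem.List.pyRange 0 40 1 := by
      rw [PySem.List.mem_pyRange_one]
      exact ⟨PySem.Int.mod_nonneg s (by norm_num), PySem.Int.mod_lt s (by norm_num)⟩
    rw [pvIndSum (PySem.List.pyRange 0 40 1) (PySem.List.nodup_pyRange_one 0 40)
          (PySem.Int.mod s 40) hmem
          (fun r => PySem.List.pyGetD p (PySem.Int.mod r (p.length : Int)) 0) x]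
    have hmm : PySem.Int.mod (PySem.Int.mod s 40) (p.length : Int) = PySem.Int.mod s (p.length : Int) := by
      simp only [PySem.Int.mod_eq_emod_of_pos (by norm_num : (0:Int) < 40),
        PySem.Int.mod_eq_emod_of_pos hL]
      exact Int.emod_emod_of_dvd s hdvd
    rw [hmm]
    by_cases h : x = PySem.List.pyGetD p (PySem.Int.mod s (p.length : Int)) 0 <;> simp [h]

-- B's score for pattern p equals the per-pattern match count
theorem pvScoreB_eq (answers p : List Int) (hL : 0 < (p.length : Int)) (hdvd : (p.length : Int) ∣ 40) :
    pvScoreRow (pvCntB answers) p = pvScoreFrom p 0 answers := by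
  unfold pvScoreRow pvCntB
  rw [pvCnt_eq]
  have hget : ∀ r : Int,
      ((pvKeys 0 answers).foldl (fun d k => d.insert k (d.getD k 0 + 1)) PySem.Dict.empty).getD
        (r, PySem.List.pyGetD p (PySem.Int.mod r (p.length : Int)) 0) 0
      = ((pvKeys 0 answers).count (r, PySem.List.pyGetD p (PySem.Int.mod r (p.length : Int)) 0) : Int) := by
    intro r
    rw [PySem.Dict.getD_foldl_insert_add_one]
    simp [PySem.Dict.getD_empty]
  calc ((PySem.List.pyRange 0 40 1).map
        (fun r => ((pvKeys 0 answers).foldl (fun d k => d.insert k (d.getD k 0 + 1)) PySem.Dict.empty).getD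
          (r, PySem.List.pyGetD p (PySem.Int.mod r (p.length : Int)) 0) 0)).sum
      = ((PySem.List.pyRange 0 40 1).map
          (fun r => ((pvKeys 0 answers).count (r, PySem.List.pyGetD p (PySem.Int.mod r (p.length : Int)) 0) : Int))).sum := by
        congr 1; exact List.map_congr_left (fun r _ => hget r)
    _ = pvScoreFrom p 0 answers := pvSum_count p hL hdvd answers 0 le_rfl

-- the two result-building tails agree on any triple of scores
theorem pvTail_eq (s1 s2 s3 : Int) :
    (PySem.List.pyRange 0 (([s1, s2, s3] : List Int).length : Int) 1).foldl (fun result i =>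
      if PySem.List.pyGetD [s1, s2, s3] i 0 == (PySem.List.max? [s1, s2, s3] (fun y => y)).getD 0
      then result ++ [i + 1] else result) []
    = ((PySem.List.enumerate [s1, s2, s3]).filter
        (fun is => is.2 == (PySem.List.max? [s1, s2, s3] (fun y => y)).getD 0)).map
        (fun is => is.1 + 1) := by
  have g0 : PySem.List.pyGetD [s1, s2, s3] (0 : Int) 0 = s1 := by
    norm_num [PySem.List.pyGetD, PySem.List.pyGet?, PySem.List.pyIdx?, Int.toNat]
  have g1 : PySem.List.pyGetD [s1, s2, s3] (1 : Int) 0 = s2 := by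
    norm_num [PySem.List.pyGetD, PySem.List.pyGet?, PySem.List.pyIdx?, Int.toNat]
  have g2 : PySem.List.pyGetD [s1, s2, s3] (2 : Int) 0 = s3 := by
    norm_num [PySem.List.pyGetD, PySem.List.pyGet?, PySem.List.pyIdx?, Int.toNat]
  have hl : (([s1, s2, s3] : List Int).length : Int) = 3 := by norm_num
  have h3 : PySem.List.pyRange 0 (3 : Int) 1 = [0, 1, 2] := by decide
  have he : PySem.List.enumerate ([s1, s2, s3] : List Int)
      = [(0, s1), (1, s2), (2, s3)] := by
    simp [PySem.List.enumerate_cons, PySem.List.enumerate_nil]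
  generalize (PySem.List.max? [s1, s2, s3] (fun y => y)).getD 0 = M at *
  rw [hl, h3, he]
  simp only [List.foldl_cons, List.foldl_nil, List.filter, g0, g1, g2]
  cases hb1 : (s1 == M) <;> cases hb2 : (s2 == M) <;> cases hb3 : (s3 == M) <;> simp

-- B's three scores, evaluated pattern by pattern
theorem pvScores_eq (answers : List Int) :
    pvPatterns.map (fun p => pvScoreRow (pvCntB answers) p)
    = [pvScoreFrom [1, 2, 3, 4, 5] 0 answers,
       pvScoreFrom [2, 1, 2, 3, 2, 4, 2, 5] 0 answers,
       pvScoreFrom [3, 3, 1, 1, 2, 2, 4, 4, 5, 5] 0 answers] := by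
  simp only [pvPatterns, List.map_cons, List.map_nil]
  rw [pvScoreB_eq answers [1, 2, 3, 4, 5] (by norm_num) (by norm_num),
      pvScoreB_eq answers [2, 1, 2, 3, 2, 4, 2, 5] (by norm_num) (by norm_num),
      pvScoreB_eq answers [3, 3, 1, 1, 2, 2, 4, 4, 5, 5] (by norm_num) (by norm_num)]

-- ===== VERDICT (by name: the statement is the Claim_ definition above) =====
theorem solution_spec : Claim_equal_solution := by
  intro answers _
  show solution answers = solution_alt answers
  unfold solution solution_alt
  simp only []
  rw [pvFoldA_eq, pvScores_eq]
  simp only [zero_add]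
  exact pvTail_eq _ _ _
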